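-- pv_equiv track=rewrite | github.com/K019N/Test-recognizer-for-AuroraOS | src/app/table_to_results.py | make_results
-- ===== SOURCE A (Python) =====
-- def make_results(table) -> list[str]:
--     res = {}
--     if any(table):
--         for j in range(len(table)):
--             for i in range(len(table[j])):
--                 if all((table[j][i] == "+", i != 0)):
--                     res[j] = i
--     return res
-- ===== SOURCE B (Python) =====
-- def make_results(table) -> list[str]:
--     res = {}
--     for j, row in enumerate(table):
--         for i in range(len(row) - 1, 0, -1):
--             if row[i] == "+":
--                 res[j] = i
--                 break
--     return res
-- ===== Notes on version B (the rewrite author's own statement) =====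
-- stated objective: simpler
-- what changed: Each row is scanned backwards from its last column and stops at the first '+' found (the last one overall), instead of forward-scanning every column and letting repeated dict overwrites keep the last match; the redundant any(table) guard is dropped.
import Mathlib
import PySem

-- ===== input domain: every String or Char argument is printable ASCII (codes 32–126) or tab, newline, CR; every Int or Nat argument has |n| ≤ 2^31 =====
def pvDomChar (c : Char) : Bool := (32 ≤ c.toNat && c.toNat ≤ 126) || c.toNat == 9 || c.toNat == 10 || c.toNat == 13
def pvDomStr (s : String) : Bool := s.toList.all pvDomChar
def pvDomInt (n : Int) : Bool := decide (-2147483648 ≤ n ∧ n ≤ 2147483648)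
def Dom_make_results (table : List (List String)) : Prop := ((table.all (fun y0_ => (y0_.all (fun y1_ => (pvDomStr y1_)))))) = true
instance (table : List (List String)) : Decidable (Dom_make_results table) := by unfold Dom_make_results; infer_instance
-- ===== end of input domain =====

-- B replaces A's forward full-row scan with last-write-wins dict overwrites by a per-row backward
-- scan that records the first '+' found (i.e. the last one) and breaks; return values are equal.

-- ===== PORT A =====
def make_results (table : List (List String)) : List (Int × Int) :=
  let res : PySem.Dict Int Int := PySem.Dict.empty
  if table.any (fun row => !row.isEmpty) then
    ((PySem.List.pyRange 0 (table.length : Int) 1).foldl (fun d j =>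
      (PySem.List.pyRange 0 ((PySem.List.pyGetD table j []).length : Int) 1).foldl (fun d i =>
        if (PySem.List.pyGetD (PySem.List.pyGetD table j []) i "" == "+") && (i != 0)
        then d.insert j i else d) d) res).items
  else res.items

-- ===== PORT B =====
def make_results_alt (table : List (List String)) : List (Int × Int) :=
  ((PySem.List.enumerate table).foldl (fun (res : PySem.Dict Int Int) jr =>
    match (PySem.List.pyRange ((jr.2.length : Int) - 1) 0 (-1)).find?
            (fun i => PySem.List.pyGetD jr.2 i "" == "+") with
    | some i => res.insert jr.1 i
    | none => res) PySem.Dict.empty).items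

-- ===== PRECONDITION & SPEC =====
def Spec_make_results (table : List (List String)) (out : List (Int × Int)) : Prop := out = make_results_alt table
instance (table : List (List String)) (out : List (Int × Int)) : Decidable (Spec_make_results table out) := by unfold Spec_make_results; infer_instance

-- ===== CLAIM (what is proved, stated in full; the proofs are below) =====
def Claim_equal_make_results : Prop := ∀ (table : List (List String)), Dom_make_results table → Spec_make_results table (make_results table)

-- ===== LEMMAS AND PROOFS =====

-- B's backward search over one row, as a named helper for the lemmas below.
def pvLastPlus (row : List String) : Option Int :=
  (PySem.List.pyRange ((row.length : Int) - 1) 0 (-1)).find?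
    (fun i => PySem.List.pyGetD row i "" == "+")

-- Repeated same-key inserts over the matches of q collapse to one insert of the LAST match,
-- i.e. the first match of the reversed list.
theorem pv_foldl_insert_eq (j : Int) (q : Int → Bool) (l : List Int) (d : PySem.Dict Int Int) :
    (l.filter q).foldl (fun d i => d.insert j i) d
      = match l.reverse.find? q with
        | some i => d.insert j i
        | none => d := by
  induction l generalizing d with
  | nil => rfl
  | cons x t ih =>
    cases hq : q x
    · simp only [List.filter_cons, List.reverse_cons, List.find?_append, List.find?_cons,
        List.find?_nil, hq, Bool.false_eq_true, if_false, Option.or_none]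
      exact ih d
    · simp only [List.filter_cons, List.reverse_cons, List.find?_append, List.find?_cons,
        hq, if_true, List.foldl_cons]
      rw [ih (d.insert j x)]
      cases t.reverse.find? q with
      | none => rfl
      | some i => simp [PySem.Dict.insert_insert_self]

-- A's inner forward loop over one row equals one insert of B's backward search result.
theorem pv_inner_eq (j : Int) (row : List String) (d : PySem.Dict Int Int) :
    (PySem.List.pyRange 0 ((row.length : Int)) 1).foldl (fun d i =>
        if (PySem.List.pyGetD row i "" == "+") && (i != 0)
        then d.insert j i else d) d
      = match pvLastPlus row with
        | some i => d.insert j i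
        | none => d := by
  rw [PySem.List.foldl_if_eq_foldl_filter]
  have hfilter : (PySem.List.pyRange 0 ((row.length : Int)) 1).filter
        (fun i => (PySem.List.pyGetD row i "" == "+") && (i != 0))
      = (PySem.List.pyRange 1 ((row.length : Int)) 1).filter
        (fun i => PySem.List.pyGetD row i "" == "+") := by
    rcases Nat.eq_zero_or_pos row.length with h0 | hpos
    · rw [h0]
      rw [PySem.List.pyRange_one_eq_nil (by norm_num), PySem.List.pyRange_one_eq_nil (by norm_num)]
      rfl
    · rw [PySem.List.pyRange_one_cons (by exact_mod_cast hpos)]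
      rw [List.filter_cons]
      simp only [bne_self_eq_false, Bool.and_false, Bool.false_eq_true, if_false]
      refine List.filter_congr ?_
      intro i hi
      rw [PySem.List.mem_pyRange_one] at hi
      have : (i != 0) = true := by simp; omega
      rw [this, Bool.and_true]
  rw [hfilter, pv_foldl_insert_eq]
  unfold pvLastPlus
  rw [PySem.List.pyRange_neg_one_eq_reverse]
  norm_num

-- A's outer loop over row indices is B's loop over enumerate(table).
theorem pv_A_fold_eq (table : List (List String)) :
    (PySem.List.pyRange 0 (table.length : Int) 1).foldl (fun d j =>
      (PySem.List.pyRange 0 ((PySem.List.pyGetD table j []).length : Int) 1).foldl (fun d i =>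
        if (PySem.List.pyGetD (PySem.List.pyGetD table j []) i "" == "+") && (i != 0)
        then d.insert j i else d) d) PySem.Dict.empty
    = (PySem.List.enumerate table).foldl (fun (res : PySem.Dict Int Int) jr =>
        match pvLastPlus jr.2 with
        | some i => res.insert jr.1 i
        | none => res) PySem.Dict.empty := by
  rw [PySem.List.enumerate_eq_map_pyRange (d := []), List.foldl_map]
  simp only [PySem.List.len_eq]
  refine PySem.List.foldl_congr_mem _ _ _ _ ?_
  intro acc x _
  exact pv_inner_eq x (PySem.List.pyGetD table x []) acc

-- If every row is empty (A's falsy-table guard), B's fold also produces the empty dict.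
theorem pv_alt_empty (table : List (List String)) (h : ∀ row ∈ table, row = []) :
    make_results_alt table = [] := by
  unfold make_results_alt
  have hbody : (PySem.List.enumerate table).foldl (fun (res : PySem.Dict Int Int) jr =>
      match (PySem.List.pyRange ((jr.2.length : Int) - 1) 0 (-1)).find?
              (fun i => PySem.List.pyGetD jr.2 i "" == "+") with
      | some i => res.insert jr.1 i
      | none => res) PySem.Dict.empty
      = (PySem.List.enumerate table).foldl (fun res _ => res) PySem.Dict.empty := by
    refine PySem.List.foldl_congr_mem _ _ _ _ ?_
    intro acc jr hjr
    rw [PySem.List.mem_enumerate_iff] at hjr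
    obtain ⟨k, hk, rfl⟩ := hjr
    have hrow : table[k] = [] := h _ (List.getElem_mem hk)
    simp only [hrow]
    rw [PySem.List.pyRange_neg_one_eq_nil (by norm_num)]
    rfl
  rw [hbody, PySem.List.foldl_ignore]
  rfl

-- ===== VERDICT (by name: the statement is the Claim_ definition above) =====
theorem make_results_spec : Claim_equal_make_results := by
  intro table _
  unfold Spec_make_results
  by_cases hany : table.any (fun row => !row.isEmpty) = true
  · unfold make_results
    simp only [hany, if_true]
    rw [pv_A_fold_eq]
    unfold make_results_alt pvLastPlus
    rfl
  · rw [Bool.not_eq_true, List.any_eq_false] at hany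
    have hrows : ∀ row ∈ table, row = [] := by
      intro row hrow
      have := hany row hrow
      simpa [List.isEmpty_iff] using this
    rw [pv_alt_empty table hrows]
    unfold make_results
    simp only [List.any_eq_false.mpr hany, Bool.false_eq_true, if_false]
    rfl
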